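-- pv_equiv track=rewrite | github.com/russpj/weaver | weaver.py | score_word_against_all
-- ===== SOURCE A (Python) =====
-- def score_word(guess, target):
--     score = 0
--     size = len(target)
--     for _ in range(size):
--         score *= 10
--         score += 1
--     if size != len(guess):
--         return score
--
--     used_guess_indices = []
--     used_target_indices = []
--     for index, letter in enumerate(guess):
--         if target[index] == letter:
--             score += 2*10**(size-index-1)
--             used_guess_indices.append(index)
--             used_target_indices.append(index)
--     for index, letter in enumerate(guess):
--         if index not in used_guess_indices:
--             for target_index, target_letter in enumerate(target):
--                 if target_index not in used_target_indices:
--                     if letter == target_letter: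
--                         score += 1*10**(size-index-1)
--                         used_guess_indices.append(index)
--                         used_target_indices.append(target_index)
--                         break
--     return score
--
-- def score_word_against_all(guess, word_list):
--     scores = {}
--     largest_bucket_size = 0
--     for key in word_list:
--         score = score_word(guess[0], key[0])
--         if score in scores:
--             scores[score] = scores[score] + 1
--         else:
--             scores[score] = 1
--         largest_bucket_size = max(largest_bucket_size, scores[score])
--     return largest_bucket_size
-- ===== SOURCE B (Python) =====
-- def score_word(guess, target):
--     size = len(target)
--     score = (10 ** size - 1) // 9
--     if size != len(guess):
--         return score
--     counts = {}
--     for i in range(size):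
--         if guess[i] != target[i]:
--             counts[target[i]] = counts.get(target[i], 0) + 1
--     for i in range(size):
--         if guess[i] == target[i]:
--             score += 2 * 10 ** (size - i - 1)
--         elif counts.get(guess[i], 0) > 0:
--             counts[guess[i]] -= 1
--             score += 10 ** (size - i - 1)
--     return score
--
-- def score_word_against_all(guess, word_list):
--     scores = {}
--     largest_bucket_size = 0
--     for key in word_list:
--         score = score_word(guess[0], key[0])
--         n = scores.get(score, 0) + 1
--         scores[score] = n
--         if n > largest_bucket_size:
--             largest_bucket_size = n
--     return largest_bucket_size
-- ===== Notes on version B (the rewrite author's own statement) =====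
-- stated objective: simpler
-- what changed: score_word now computes the all-ones base by closed form and replaces the nested target scan with both used-index lists by a one-pass letter counter built from non-green target positions, decremented per yellow awarded; the outer loop uses dict.get instead of the membership branch.
import Mathlib
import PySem

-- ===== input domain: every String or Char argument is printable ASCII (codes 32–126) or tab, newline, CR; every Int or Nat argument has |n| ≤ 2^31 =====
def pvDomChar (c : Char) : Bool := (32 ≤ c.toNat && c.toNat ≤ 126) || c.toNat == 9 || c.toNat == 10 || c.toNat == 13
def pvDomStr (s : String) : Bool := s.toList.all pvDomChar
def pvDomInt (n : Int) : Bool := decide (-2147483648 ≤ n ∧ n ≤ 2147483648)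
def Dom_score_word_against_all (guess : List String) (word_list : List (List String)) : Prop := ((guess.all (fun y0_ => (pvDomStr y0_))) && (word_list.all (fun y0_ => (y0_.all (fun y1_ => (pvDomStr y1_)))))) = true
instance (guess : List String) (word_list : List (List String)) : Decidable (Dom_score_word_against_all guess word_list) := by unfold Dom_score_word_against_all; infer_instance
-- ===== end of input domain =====

-- B replaces score_word's nested target scan with used-index lists by a closed-form base and a
-- one-pass letter counter over non-green positions (objective: simpler); same return value.

-- ===== PORT A =====
def swBase (size : Nat) : Int := (List.range size).foldl (fun s _ => s * 10 + 1) 0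

def enumN (k : Nat) : List Char → List (Nat × Char)
  | [] => []
  | c :: cs => (k, c) :: enumN (k + 1) cs

def swFind (ut : List Nat) (letter : Char) : List (Nat × Char) → Option Nat
  | [] => none
  | (j, c) :: rest =>
    if j ∈ ut then swFind ut letter rest
    else if letter = c then some j
    else swFind ut letter rest

def swGreen (tl : List Char) (size : Nat) :
    Int × List Nat × List Nat → List (Nat × Char) → Int × List Nat × List Nat
  | st, [] => st
  | (score, ug, ut), (i, c) :: rest =>
    if tl.getD i ' ' = c then
      swGreen tl size (score + 2 * 10 ^ (size - i - 1), ug ++ [i], ut ++ [i]) rest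
    else
      swGreen tl size (score, ug, ut) rest

def swYellow (tl : List Char) (size : Nat) :
    Int × List Nat × List Nat → List (Nat × Char) → Int × List Nat × List Nat
  | st, [] => st
  | (score, ug, ut), (i, c) :: rest =>
    if i ∈ ug then swYellow tl size (score, ug, ut) rest
    else
      match swFind ut c (enumN 0 tl) with
      | some j => swYellow tl size (score + 1 * 10 ^ (size - i - 1), ug ++ [i], ut ++ [j]) rest
      | none => swYellow tl size (score, ug, ut) rest

def score_word (guess target : String) : Int :=
  let gl := guess.toList
  let tl := target.toList
  let size := tl.length
  let score := swBase size
  if size ≠ gl.length then score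
  else
    let st := swGreen tl size (score, [], []) (enumN 0 gl)
    (swYellow tl size st (enumN 0 gl)).1

def score_word_against_all (guess : List String) (word_list : List (List String)) : Int :=
  match guess with
  | [] => 0
  | g :: _ =>
    (word_list.foldl
      (fun (st : PySem.Dict Int Int × Int) key =>
        let s := score_word g (key.headD "")
        let scores := if st.1.contains s then st.1.insert s (st.1.getD s 0 + 1)
                      else st.1.insert s 1
        (scores, max st.2 (scores.getD s 0)))
      (PySem.Dict.empty, 0)).2

-- ===== PORT B =====
def score_word_alt (guess target : String) : Int :=
  let gl := guess.toList
  let tl := target.toList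
  let size := tl.length
  let score : Int := PySem.Int.floordiv (10 ^ size - 1) 9
  if size ≠ gl.length then score
  else
    let counts := (List.range size).foldl
      (fun (d : PySem.Dict Char Int) i =>
        if gl.getD i ' ' ≠ tl.getD i ' ' then
          d.insert (tl.getD i ' ') (d.getD (tl.getD i ' ') 0 + 1)
        else d)
      PySem.Dict.empty
    ((List.range size).foldl
      (fun (p : Int × PySem.Dict Char Int) i =>
        if gl.getD i ' ' = tl.getD i ' ' then (p.1 + 2 * 10 ^ (size - i - 1), p.2)
        else if 0 < p.2.getD (gl.getD i ' ') 0 then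
          (p.1 + 10 ^ (size - i - 1), p.2.insert (gl.getD i ' ') (p.2.getD (gl.getD i ' ') 0 - 1))
        else p)
      (score, counts)).1

def score_word_against_all_alt (guess : List String) (word_list : List (List String)) : Int :=
  match guess with
  | [] => 0
  | g :: _ =>
    (word_list.foldl
      (fun (st : PySem.Dict Int Int × Int) key =>
        let s := score_word_alt g (key.headD "")
        let n := st.1.getD s 0 + 1
        (st.1.insert s n, if st.2 < n then n else st.2))
      (PySem.Dict.empty, 0)).2

-- ===== PRECONDITION & SPEC =====
-- Pre_ excludes exactly the inputs where the Python raises IndexError: an empty guess list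
-- while word_list is nonempty ('guess[0]' is evaluated once per key), or an empty key ('key[0]').
def Pre_score_word_against_all (guess : List String) (word_list : List (List String)) : Prop :=
  (word_list ≠ [] → guess ≠ []) ∧ ∀ key ∈ word_list, key ≠ []
instance (guess : List String) (word_list : List (List String)) : Decidable (Pre_score_word_against_all guess word_list) := by unfold Pre_score_word_against_all; infer_instance

def pvWitness_score_word_against_all : List String × List (List String) :=
  (["cat"], [["cot"], ["tac"], ["cat"], ["dog"]])

def Spec_score_word_against_all (guess : List String) (word_list : List (List String)) (out : Int) : Prop := out = score_word_against_all_alt guess word_list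
instance (guess : List String) (word_list : List (List String)) (out : Int) : Decidable (Spec_score_word_against_all guess word_list out) := by unfold Spec_score_word_against_all; infer_instance

-- ===== CLAIM (what is proved, stated in full; the proofs are below) =====
def Claim_equal_score_word_against_all : Prop := ∀ (guess : List String) (word_list : List (List String)), Dom_score_word_against_all guess word_list → Pre_score_word_against_all guess word_list → Spec_score_word_against_all guess word_list (score_word_against_all guess word_list)

-- ===== LEMMAS AND PROOFS =====

-- proof-side abbreviations: the set of green indices, green-score sums, and the multiset
-- (as a count function) of target letters at positions not yet used
def gfilter (gl tl : List Char) (L : List Nat) : List Nat :=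
  L.filter (fun i => decide (tl.getD i ' ' = gl.getD i ' '))

def gset (gl tl : List Char) (n : Nat) : List Nat := gfilter gl tl (List.range n)

def gsum (gl tl : List Char) (n : Nat) (L : List Nat) : Int :=
  ((gfilter gl tl L).map (fun i => 2 * (10:Int) ^ (n - i - 1))).sum

def cnt (tl : List Char) (n : Nat) (ut : List Nat) (c : Char) : Nat :=
  ((List.range n).filter (fun j => decide (j ∉ ut ∧ c = tl.getD j ' '))).length

lemma swBase_succ (n : Nat) : swBase (n+1) = swBase n * 10 + 1 := by
  simp [swBase, List.range_succ]

lemma swBase_mul : ∀ n : Nat, 9 * swBase n = 10 ^ n - 1 := by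
  intro n
  induction n with
  | zero => simp [swBase]
  | succ n ih =>
    rw [swBase_succ]
    calc 9 * (swBase n * 10 + 1) = (9 * swBase n) * 10 + 9 := by ring
      _ = (10 ^ n - 1) * 10 + 9 := by rw [ih]
      _ = 10 ^ (n + 1) - 1 := by ring

lemma swBase_eq (n : Nat) : swBase n = PySem.Int.floordiv (10 ^ n - 1) 9 := by
  rw [PySem.Int.floordiv_eq_ediv_of_pos (by norm_num), ← swBase_mul n,
    Int.mul_ediv_cancel_left _ (by norm_num)]

lemma enumN_eq (cs : List Char) : ∀ k : Nat,
    enumN k cs = (List.range cs.length).map (fun j => (k + j, cs.getD j ' ')) := by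
  induction cs with
  | nil => intro k; simp [enumN]
  | cons c cs ih =>
    intro k
    rw [List.length_cons, List.range_succ_eq_map, List.map_cons, List.map_map]
    simp only [enumN, ih (k+1)]
    refine List.cons_eq_cons.mpr ⟨by simp, ?_⟩
    apply List.map_congr_left
    intro j _
    simp [Function.comp]
    omega

lemma enumN_zero (cs : List Char) :
    enumN 0 cs = (List.range cs.length).map (fun j => (j, cs.getD j ' ')) := by
  simp [enumN_eq]

lemma swFind_eq (tl : List Char) (ut : List Nat) (c : Char) (L : List Nat) :
    swFind ut c (L.map (fun j => (j, tl.getD j ' ')))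
      = (L.filter (fun j => decide (j ∉ ut ∧ c = tl.getD j ' '))).head? := by
  induction L with
  | nil => simp [swFind]
  | cons j L ih =>
    by_cases hj : j ∈ ut
    · rw [List.map_cons, List.filter_cons_of_neg (by simp [hj]), ← ih]
      simp only [swFind, if_pos hj]
    · by_cases hc : c = tl.getD j ' '
      · rw [List.map_cons, List.filter_cons_of_pos (by simp [hj]; exact hc)]
        simp only [swFind, if_neg hj, if_pos hc, List.head?_cons]
      · rw [List.map_cons, List.filter_cons_of_neg (by simp [hj]; exact hc), ← ih]
        simp only [swFind, if_neg hj, if_neg hc]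

lemma cnt_snoc_self (tl : List Char) (n : Nat) (ut : List Nat) (j₀ : Nat)
    (hj : j₀ < n) (hju : j₀ ∉ ut) :
    cnt tl n ut (tl.getD j₀ ' ') = cnt tl n (ut ++ [j₀]) (tl.getD j₀ ' ') + 1 := by
  unfold cnt
  have h1 : ((List.range n).filter (fun j => decide (j ∉ ut ++ [j₀] ∧ tl.getD j₀ ' ' = tl.getD j ' ')))
      = ((List.range n).filter (fun j => decide (j ∉ ut ∧ tl.getD j₀ ' ' = tl.getD j ' '))).filter
          (fun j => j != j₀) := by
    rw [List.filter_filter]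
    apply List.filter_congr
    intro j _
    by_cases h : j = j₀
    · subst h; simp [List.mem_append]
    · by_cases h2 : j ∈ ut <;> simp [List.mem_append, h, h2]
  have hmem : j₀ ∈ (List.range n).filter (fun j => decide (j ∉ ut ∧ tl.getD j₀ ' ' = tl.getD j ' ')) := by
    simp [List.mem_filter, List.mem_range, hj, hju]
  have hnd : ((List.range n).filter (fun j => decide (j ∉ ut ∧ tl.getD j₀ ' ' = tl.getD j ' '))).Nodup :=
    (List.nodup_range).filter _
  rw [h1, ← List.Nodup.erase_eq_filter hnd, List.length_erase_of_mem hmem]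
  have := List.length_pos_of_mem hmem
  omega

lemma cnt_snoc_ne (tl : List Char) (n : Nat) (ut : List Nat) (j₀ : Nat) (c' : Char)
    (hne : c' ≠ tl.getD j₀ ' ') :
    cnt tl n (ut ++ [j₀]) c' = cnt tl n ut c' := by
  unfold cnt
  congr 1
  apply List.filter_congr
  intro j _
  by_cases h : j = j₀
  · subst h
    simp only [List.mem_append, decide_eq_decide]
    constructor
    · rintro ⟨h1, h2⟩
      exact absurd (Or.inr (by simp)) h1
    · rintro ⟨h1, h2⟩
      exact absurd h2 hne
  · by_cases h2 : j ∈ ut <;> simp [List.mem_append, h, h2]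

lemma swGreen_eq (tl : List Char) (n : Nat) : ∀ (E : List (Nat × Char)) (s : Int) (ug ut : List Nat),
    swGreen tl n (s, ug, ut) E =
      (s + ((E.filter (fun p => decide (tl.getD p.1 ' ' = p.2))).map (fun p => 2 * (10:Int) ^ (n - p.1 - 1))).sum,
       ug ++ (E.filter (fun p => decide (tl.getD p.1 ' ' = p.2))).map (·.1),
       ut ++ (E.filter (fun p => decide (tl.getD p.1 ' ' = p.2))).map (·.1)) := by
  intro E
  induction E with
  | nil => intro s ug ut; simp [swGreen]
  | cons p E ih =>
    obtain ⟨i, c⟩ := p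
    intro s ug ut
    by_cases h : tl.getD i ' ' = c
    · rw [List.filter_cons_of_pos (by simpa using h)]
      simp only [swGreen, if_pos h, ih, List.map_cons, List.sum_cons, Prod.mk.injEq]
      refine ⟨by ring, ?_, ?_⟩ <;> simp [List.append_assoc]
    · rw [List.filter_cons_of_neg (by simpa using h)]
      simp only [swGreen, if_neg h, ih]

lemma counts_getD (gl tl : List Char) (n : Nat) (c : Char) :
    ((List.range n).foldl
      (fun (d : PySem.Dict Char Int) i =>
        if gl.getD i ' ' ≠ tl.getD i ' ' then
          d.insert (tl.getD i ' ') (d.getD (tl.getD i ' ') 0 + 1)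
        else d)
      PySem.Dict.empty).getD c 0 = (cnt tl n (gset gl tl n) c : Int) := by
  rw [PySem.List.foldl_ite_eq_foldl_filter]
  have hm : ((((List.range n).filter (fun x => decide (gl.getD x ' ' ≠ tl.getD x ' '))).map
        (fun i => tl.getD i ' ')).foldl
          (fun (d : PySem.Dict Char Int) x => d.insert x (d.getD x 0 + 1)) PySem.Dict.empty)
      = (((List.range n).filter (fun x => decide (gl.getD x ' ' ≠ tl.getD x ' ')))).foldl
          (fun (d : PySem.Dict Char Int) i =>
            d.insert (tl.getD i ' ') (d.getD (tl.getD i ' ') 0 + 1)) PySem.Dict.empty :=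
    List.foldl_map
  rw [← hm, PySem.Dict.getD_foldl_insert_add_one, PySem.Dict.getD_empty, zero_add]
  rw [List.count_eq_countP, List.countP_map, List.countP_eq_length_filter, List.filter_filter]
  unfold cnt
  refine congrArg (fun m : Nat => (m : Int)) (congrArg List.length (List.filter_congr ?_))
  intro j hj
  have hjr : j ∈ List.range n := hj
  have hmemg : (j ∈ gset gl tl n) ↔ tl.getD j ' ' = gl.getD j ' ' := by
    unfold gset gfilter
    rw [List.mem_filter]
    simp [hjr]
  rw [Bool.eq_iff_iff]
  simp only [Function.comp_def, Bool.and_eq_true, beq_iff_eq, decide_eq_true_eq]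
  rw [hmemg]
  constructor
  · rintro ⟨h1, h2⟩
    exact ⟨fun hm => h2 hm.symm, h1.symm⟩
  · rintro ⟨h1, h2⟩
    exact ⟨h2.symm, fun hgg => h1 hgg.symm⟩

lemma yellow_main (gl tl : List Char) (n : Nat) (hn : tl.length = n) :
    ∀ (L : List Nat), L.Nodup → (∀ i ∈ L, i < n) →
    ∀ (ys ut : List Nat), (∀ j ∈ ys, j ∉ L) →
    ∀ (s sB : Int) (D : PySem.Dict Char Int),
      (∀ c, D.getD c 0 = (cnt tl n ut c : Int)) →
      s = sB + gsum gl tl n L →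
      (swYellow tl n (s, gset gl tl n ++ ys, ut) (L.map (fun j => (j, gl.getD j ' ')))).1
        = (L.foldl (fun (p : Int × PySem.Dict Char Int) i =>
            if gl.getD i ' ' = tl.getD i ' ' then (p.1 + 2 * 10 ^ (n - i - 1), p.2)
            else if 0 < p.2.getD (gl.getD i ' ') 0 then
              (p.1 + 10 ^ (n - i - 1), p.2.insert (gl.getD i ' ') (p.2.getD (gl.getD i ' ') 0 - 1))
            else p) (sB, D)).1 := by
  intro L
  induction L with
  | nil =>
    intro _ _ ys ut _ s sB D _ hs
    simpa [swYellow, gsum, gfilter] using hs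
  | cons i L ih =>
    intro hnd hlt ys ut hys s sB D hD hs
    have hiL : i ∉ L := (List.nodup_cons.mp hnd).1
    have hndL : L.Nodup := (List.nodup_cons.mp hnd).2
    have hin : i < n := hlt i (List.mem_cons_self)
    rw [List.map_cons, List.foldl_cons]
    by_cases hgi : tl.getD i ' ' = gl.getD i ' '
    · -- green position
      have hmem : i ∈ gset gl tl n ++ ys :=
        List.mem_append.mpr (Or.inl (by
          simp [gset, gfilter, List.mem_filter, List.mem_range, hin]
          exact hgi))
      have hgs : gsum gl tl n (i :: L) = 2 * (10:Int) ^ (n - i - 1) + gsum gl tl n L := by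
        unfold gsum gfilter
        rw [List.filter_cons_of_pos (by simpa using hgi), List.map_cons, List.sum_cons]
      simp only [swYellow]
      rw [if_pos hmem, if_pos hgi.symm]
      exact ih hndL (fun j hj => hlt j (List.mem_cons_of_mem _ hj)) ys ut
        (fun j hj hjL => hys j hj (List.mem_cons_of_mem _ hjL)) s
        (sB + 2 * 10 ^ (n - i - 1)) D hD (by rw [hs, hgs]; ring)
    · -- non-green position
      have hnotg : i ∉ gset gl tl n := by
        simp [gset, gfilter, List.mem_filter]
        exact fun _ => hgi
      have hnoty : i ∉ ys := fun h => hys i h List.mem_cons_self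
      have hnotmem : i ∉ gset gl tl n ++ ys := by
        simp [List.mem_append, hnotg, hnoty]
      have hgs : gsum gl tl n (i :: L) = gsum gl tl n L := by
        unfold gsum gfilter
        rw [List.filter_cons_of_neg (by simpa using hgi)]
      simp only [swYellow]
      rw [if_neg hnotmem, if_neg (fun h => hgi h.symm)]
      rw [enumN_zero, hn, swFind_eq]
      set c := gl.getD i ' ' with hcdef
      set F := (List.range n).filter (fun j => decide (j ∉ ut ∧ c = tl.getD j ' ')) with hFdef
      have hcnt : cnt tl n ut c = F.length := rfl
      cases hFeq : F with
      | nil =>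
        rw [hFeq] at hcnt
        simp only [List.head?_nil]
        rw [if_neg (by rw [hD c, hcnt]; simp)]
        exact ih hndL (fun j hj => hlt j (List.mem_cons_of_mem _ hj)) ys ut
          (fun j hj hjL => hys j hj (List.mem_cons_of_mem _ hjL)) s sB D hD
          (by rw [hs, hgs])
      | cons j₀ F' =>
        have hj₀F : j₀ ∈ F := by rw [hFeq]; exact List.mem_cons_self
        have hj₀p := List.mem_filter.mp (hFdef ▸ hj₀F)
        have hj₀n : j₀ < n := List.mem_range.mp hj₀p.1
        obtain ⟨hj₀ut, hj₀c⟩ := of_decide_eq_true hj₀p.2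
        rw [hFeq] at hcnt
        simp only [List.head?_cons]
        have hpos : (0:Int) < D.getD c 0 := by
          rw [hD c, hcnt]; simp
        rw [if_pos hpos]
        rw [List.append_assoc]
        refine ih hndL (fun j hj => hlt j (List.mem_cons_of_mem _ hj)) (ys ++ [i]) (ut ++ [j₀])
          ?_ (s + 1 * 10 ^ (n - i - 1)) (sB + 10 ^ (n - i - 1))
          (D.insert c (D.getD c 0 - 1)) ?_ (by rw [hs, hgs]; ring)
        · intro j hj
          rcases List.mem_append.mp hj with h | h
          · exact fun hjL => hys j h (List.mem_cons_of_mem _ hjL)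
          · rw [List.mem_singleton.mp h]; exact hiL
        · intro c'
          rw [PySem.Dict.getD_insert]
          split_ifs with hcc
          · subst hcc
            rw [hD c, hcnt]
            have h2 := cnt_snoc_self tl n ut j₀ hj₀n hj₀ut
            rw [← hj₀c, hcnt] at h2
            omega
          · rw [hD c']
            have hne : c' ≠ tl.getD j₀ ' ' := by rw [← hj₀c]; exact hcc
            rw [cnt_snoc_ne tl n ut j₀ c' hne]

lemma score_word_eq (g t : String) : score_word g t = score_word_alt g t := by
  unfold score_word score_word_alt
  by_cases h : t.toList.length ≠ g.toList.length
  · rw [if_pos h, if_pos h, swBase_eq]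
  · rw [if_neg h, if_neg h]
    have hlen : g.toList.length = t.toList.length := (not_ne_iff.mp h).symm
    rw [enumN_zero, hlen, swGreen_eq]
    rw [List.filter_map]
    simp only [List.map_map, List.nil_append, Function.comp_def]
    have hy := yellow_main g.toList t.toList t.toList.length rfl
      (List.range t.toList.length) List.nodup_range (fun i hi => List.mem_range.mp hi)
      [] (gset g.toList t.toList t.toList.length)
      (fun j hj => absurd hj (List.not_mem_nil))
      (swBase t.toList.length + gsum g.toList t.toList t.toList.length (List.range t.toList.length))
      (PySem.Int.floordiv (10 ^ t.toList.length - 1) 9)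
      ((List.range t.toList.length).foldl
        (fun (d : PySem.Dict Char Int) i =>
          if g.toList.getD i ' ' ≠ t.toList.getD i ' ' then
            d.insert (t.toList.getD i ' ') (d.getD (t.toList.getD i ' ') 0 + 1)
          else d)
        PySem.Dict.empty)
      (fun c => counts_getD g.toList t.toList t.toList.length c)
      (by rw [swBase_eq])
    rw [List.append_nil] at hy
    simp only [gsum, gset, gfilter] at hy
    simpa using hy

lemma max_ite (a b : Int) : max a b = if a < b then b else a := (max_def_lt a b)

lemma against_all_eq (guess : List String) (word_list : List (List String)) :
    score_word_against_all guess word_list = score_word_against_all_alt guess word_list := by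
  unfold score_word_against_all score_word_against_all_alt
  cases guess with
  | nil => rfl
  | cons g rest =>
    refine congrArg Prod.snd (PySem.List.foldl_congr_mem _ _ _ _ ?_)
    intro st key _
    dsimp only
    rw [score_word_eq]
    by_cases hc : st.1.contains (score_word_alt g (key.headD "")) = true
    · rw [if_pos hc, PySem.Dict.getD_insert_self, max_ite]
    · rw [if_neg hc, PySem.Dict.getD_insert_self, max_ite]
      have h0 : st.1.getD (score_word_alt g (key.headD "")) 0 = 0 := by
        apply PySem.Dict.getD_of_not_contains
        simpa using hc
      rw [h0]
      norm_num

-- ===== VERDICT (by name: the statement is the Claim_ definition above) =====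
theorem score_word_against_all_spec : Claim_equal_score_word_against_all := by
  intro guess word_list _ _
  unfold Spec_score_word_against_all
  exact against_all_eq guess word_list
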